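-- pv_equiv track=rewrite | github.com/fabianruiz3/pokerbots-2026 | Camello_cfr copy/abstraction.py | get_hole_bucket_2card
-- ===== SOURCE A (Python) =====
-- def get_hole_bucket_2card(hole_cards):
--     """
--     Compute hole bucket for 2-card hand - matches C++ hole_bucket_2card.
--
--     Args:
--         hole_cards: list of 2 card ints or strings
--
--     Returns:
--         bucket index
--     """
--     cards = []
--     for c in hole_cards:
--         if isinstance(c, int):
--             cards.append(c)
--         else:
--             cards.append(card_str_to_int(str(c)))
--
--     r0 = cards[0] // 4
--     r1 = cards[1] // 4
--     hi = max(r0, r1)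
--     lo = min(r0, r1)
--     suited = (cards[0] % 4) == (cards[1] % 4)
--
--     # Pairs: buckets 0-12
--     if hi == lo:
--         return hi
--
--     # Non-pairs
--     base = 13 + (hi * (hi - 1)) // 2 + lo
--     if suited:
--         base += 78
--     return base
--
-- def card_str_to_int(card_str):
--     """
--     Convert card string like 'Ah' to int format (rank*4 + suit).
--
--     Rank: 2=0, 3=1, ..., T=8, J=9, Q=10, K=11, A=12
--     Suit: c=0, d=1, h=2, s=3 (or any consistent mapping)
--     """
--     rank_map = {'2': 0, '3': 1, '4': 2, '5': 3, '6': 4, '7': 5, '8': 6, '9': 7,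
--                 'T': 8, 'J': 9, 'Q': 10, 'K': 11, 'A': 12}
--     suit_map = {'c': 0, 'd': 1, 'h': 2, 's': 3}
--
--     r = rank_map.get(card_str[0].upper(), 0)
--     s = suit_map.get(card_str[1].lower(), 0)
--     return r * 4 + s
-- ===== SOURCE B (Python) =====
-- def card_str_to_int(card_str):
--     """
--     Convert card string like 'Ah' to int format (rank*4 + suit).
--
--     Rank: 2=0, 3=1, ..., T=8, J=9, Q=10, K=11, A=12
--     Suit: c=0, d=1, h=2, s=3 (or any consistent mapping)
--     """
--     rank_map = {'2': 0, '3': 1, '4': 2, '5': 3, '6': 4, '7': 5, '8': 6, '9': 7,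
--                 'T': 8, 'J': 9, 'Q': 10, 'K': 11, 'A': 12}
--     suit_map = {'c': 0, 'd': 1, 'h': 2, 's': 3}
--
--     r = rank_map.get(card_str[0].upper(), 0)
--     s = suit_map.get(card_str[1].lower(), 0)
--     return r * 4 + s
--
--
-- # 169-bucket lookup table built once at module load: pairs first, then the
-- # non-pair buckets by an incrementing counter (offsuit from 13, suited +78).
-- _HOLE_TABLE = {}
-- for _r in range(13):
--     _HOLE_TABLE[(_r, _r, False)] = _r
--     _HOLE_TABLE[(_r, _r, True)] = _r
-- _n = 13
-- for _hi in range(1, 13):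
--     for _lo in range(_hi):
--         _HOLE_TABLE[(_hi, _lo, False)] = _n
--         _HOLE_TABLE[(_hi, _lo, True)] = _n + 78
--         _n += 1
--
--
-- def get_hole_bucket_2card(hole_cards):
--     """
--     Compute hole bucket for 2-card hand - matches C++ hole_bucket_2card.
--     """
--     cards = []
--     for c in hole_cards:
--         if isinstance(c, int):
--             cards.append(c)
--         else:
--             cards.append(card_str_to_int(str(c)))
--
--     r0 = cards[0] // 4
--     r1 = cards[1] // 4
--     hi = max(r0, r1)
--     lo = min(r0, r1)
--     suited = (cards[0] % 4) == (cards[1] % 4)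
--     return _HOLE_TABLE[(hi, lo, suited)]
-- ===== Notes on version B (the rewrite author's own statement) =====
-- stated objective: idiomatic
-- what changed: Replaces the inline closed-form bucket arithmetic (pair test plus 13 + hi*(hi-1)/2 + lo + 78*suited) by a 169-entry lookup table built once at module load by nested enumeration, keyed by (hi, lo, suited).
import Mathlib
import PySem

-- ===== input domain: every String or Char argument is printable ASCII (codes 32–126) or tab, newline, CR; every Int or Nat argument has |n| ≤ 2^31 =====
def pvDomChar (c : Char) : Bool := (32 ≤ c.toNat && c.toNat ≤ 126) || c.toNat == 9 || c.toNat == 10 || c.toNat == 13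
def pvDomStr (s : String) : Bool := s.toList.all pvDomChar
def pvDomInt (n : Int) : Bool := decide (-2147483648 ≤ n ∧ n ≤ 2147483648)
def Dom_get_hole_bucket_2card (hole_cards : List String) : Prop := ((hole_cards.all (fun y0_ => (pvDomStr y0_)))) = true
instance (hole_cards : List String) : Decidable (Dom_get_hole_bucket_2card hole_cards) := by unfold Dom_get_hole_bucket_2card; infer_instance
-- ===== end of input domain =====

-- B replaces the closed-form bucket arithmetic by a 169-bucket lookup table built
-- once by nested enumeration (idiomatic data-structure variant; not faster).

-- ===== PORT A =====
-- shared helper (B keeps card_str_to_int unchanged)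
def card_str_to_int (card_str : String) : Int :=
  let rank_map : PySem.Dict Char Int := PySem.Dict.mk
    [('2', 0), ('3', 1), ('4', 2), ('5', 3), ('6', 4), ('7', 5), ('8', 6), ('9', 7),
     ('T', 8), ('J', 9), ('Q', 10), ('K', 11), ('A', 12)]
  let suit_map : PySem.Dict Char Int := PySem.Dict.mk
    [('c', 0), ('d', 1), ('h', 2), ('s', 3)]
  -- card_str[0] / card_str[1]: IndexError on strings shorter than 2 (excluded by Pre_)
  let c0 := (PySem.Str.pyGet? card_str 0).getD ' '
  let c1 := (PySem.Str.pyGet? card_str 1).getD ' '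
  let r := rank_map.getD (PySem.Chars.upperChar c0) 0
  let s := suit_map.getD (PySem.Chars.lowerChar c1) 0
  r * 4 + s

def get_hole_bucket_2card (hole_cards : List String) : Int :=
  -- the isinstance(c, int) branch is dead for a List String argument
  let cards := hole_cards.foldl (fun acc c => acc ++ [card_str_to_int c]) []
  -- cards[0] / cards[1]: IndexError when fewer than 2 cards (excluded by Pre_)
  let c0 := PySem.List.pyGetD cards 0 0
  let c1 := PySem.List.pyGetD cards 1 0
  let r0 := PySem.Int.floordiv c0 4
  let r1 := PySem.Int.floordiv c1 4
  let hi := max r0 r1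
  let lo := min r0 r1
  let suited := PySem.Int.mod c0 4 == PySem.Int.mod c1 4
  if hi == lo then hi
  else
    let base := 13 + PySem.Int.floordiv (hi * (hi - 1)) 2 + lo
    if suited then base + 78 else base

-- ===== PORT B =====
-- module-level table: pairs first, then non-pairs by an incrementing counter
def pvHoleTable : PySem.Dict (Int × Int × Bool) Int :=
  let t := (PySem.List.pyRange 0 13 1).foldl
    (fun d r => (d.insert (r, r, false) r).insert (r, r, true) r) PySem.Dict.empty
  let tn := (PySem.List.pyRange 1 13 1).foldl
    (fun tn hi => (PySem.List.pyRange 0 hi 1).foldl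
      (fun tn lo =>
        (((tn.1.insert (hi, lo, false) tn.2).insert (hi, lo, true) (tn.2 + 78)), tn.2 + 1))
      tn)
    (t, (13 : Int))
  tn.1

def get_hole_bucket_2card_alt (hole_cards : List String) : Int :=
  let cards := hole_cards.map (fun c => card_str_to_int c)
  let c0 := PySem.List.pyGetD cards 0 0
  let c1 := PySem.List.pyGetD cards 1 0
  let r0 := PySem.Int.floordiv c0 4
  let r1 := PySem.Int.floordiv c1 4
  let hi := max r0 r1
  let lo := min r0 r1
  let suited := PySem.Int.mod c0 4 == PySem.Int.mod c1 4
  -- _HOLE_TABLE[(hi, lo, suited)]: the key is always present (0 ≤ lo ≤ hi ≤ 12)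
  pvHoleTable.getD (hi, lo, suited) 0

-- ===== PRECONDITION & SPEC =====
-- Pre_ excludes exactly the inputs where A raises IndexError: fewer than two
-- cards, or a card string shorter than two characters.
def Pre_get_hole_bucket_2card (hole_cards : List String) : Prop :=
  2 ≤ hole_cards.length ∧ ∀ s ∈ hole_cards, 2 ≤ s.toList.length

instance (hole_cards : List String) : Decidable (Pre_get_hole_bucket_2card hole_cards) := by
  unfold Pre_get_hole_bucket_2card; infer_instance

def pvWitness_get_hole_bucket_2card : List String := ["Ah", "Kd"]

def Spec_get_hole_bucket_2card (hole_cards : List String) (out : Int) : Prop := out = get_hole_bucket_2card_alt hole_cards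
instance (hole_cards : List String) (out : Int) : Decidable (Spec_get_hole_bucket_2card hole_cards out) := by unfold Spec_get_hole_bucket_2card; infer_instance

-- ===== CLAIM (what is proved, stated in full; the proofs are below) =====
def Claim_equal_get_hole_bucket_2card : Prop := ∀ (hole_cards : List String), Dom_get_hole_bucket_2card hole_cards → Pre_get_hole_bucket_2card hole_cards → Spec_get_hole_bucket_2card hole_cards (get_hole_bucket_2card hole_cards)

-- ===== LEMMAS AND PROOFS =====

-- getD from a dict is bounded when all values and the default are
lemma pvGetD_bounds {lo hi : Int} (d : PySem.Dict Char Int) (k : Char) (dflt : Int)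
    (hd : ∀ v ∈ d.values, lo ≤ v ∧ v ≤ hi) (h0 : lo ≤ dflt ∧ dflt ≤ hi) :
    lo ≤ d.getD k dflt ∧ d.getD k dflt ≤ hi := by
  rw [PySem.Dict.getD_eq_get?_getD]
  cases h : d.get? k with
  | none => simpa using h0
  | some v =>
      have hv : v ∈ d.values := by
        have := PySem.Dict.mem_items_of_get?_eq_some d h
        simp only [PySem.Dict.values]
        exact List.mem_map_of_mem this
      simpa using hd v hv

-- every card code is in [0, 52)
lemma card_str_to_int_bounds (s : String) :
    0 ≤ card_str_to_int s ∧ card_str_to_int s < 52 := by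
  unfold card_str_to_int
  dsimp only
  have hr := pvGetD_bounds (lo := 0) (hi := 12)
    (PySem.Dict.mk
      [('2', 0), ('3', 1), ('4', 2), ('5', 3), ('6', 4), ('7', 5), ('8', 6), ('9', 7),
       ('T', 8), ('J', 9), ('Q', 10), ('K', 11), ('A', 12)])
    (PySem.Chars.upperChar ((PySem.Str.pyGet? s 0).getD ' ')) 0 (by decide) (by decide)
  have hs := pvGetD_bounds (lo := 0) (hi := 3)
    (PySem.Dict.mk [('c', 0), ('d', 1), ('h', 2), ('s', 3)])
    (PySem.Chars.lowerChar ((PySem.Str.pyGet? s 1).getD ' ')) 0 (by decide) (by decide)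
  omega

-- the table agrees with A's closed form on every (hi, lo, suited) with lo ≤ hi < 13
set_option maxRecDepth 4000 in
lemma tbl_eq : ∀ hi : Nat, hi < 13 → ∀ lo : Nat, lo < 13 → ∀ st : Bool, lo ≤ hi →
    (if ((hi : Int) == (lo : Int)) then (hi : Int)
     else if st then 13 + PySem.Int.floordiv ((hi : Int) * ((hi : Int) - 1)) 2 + (lo : Int) + 78
     else 13 + PySem.Int.floordiv ((hi : Int) * ((hi : Int) - 1)) 2 + (lo : Int)) =
    pvHoleTable.getD ((hi : Int), (lo : Int), st) 0 := by
  decide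

-- ===== VERDICT (by name: the statement is the Claim_ definition above) =====
set_option maxRecDepth 4000 in
theorem get_hole_bucket_2card_spec : Claim_equal_get_hole_bucket_2card := by
  unfold Claim_equal_get_hole_bucket_2card
  intro hole_cards _ hpre
  obtain ⟨hlen, _⟩ := hpre
  match hole_cards, hlen with
  | s0 :: s1 :: rest, _ =>
    unfold Spec_get_hole_bucket_2card get_hole_bucket_2card get_hole_bucket_2card_alt
    rw [PySem.List.foldl_append_singleton_eq_map]
    simp only [List.nil_append, List.map_cons, PySem.List.pyGetD_ofNat',
      List.getD_cons_zero, List.getD_cons_succ]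
    obtain ⟨h0a, h0b⟩ := card_str_to_int_bounds s0
    obtain ⟨h1a, h1b⟩ := card_str_to_int_bounds s1
    rw [PySem.Int.floordiv_eq_ediv_of_pos (a := card_str_to_int s0) (by norm_num),
        PySem.Int.floordiv_eq_ediv_of_pos (a := card_str_to_int s1) (by norm_num)]
    obtain ⟨hiN, hhi⟩ := Int.eq_ofNat_of_zero_le
      (a := max (card_str_to_int s0 / 4) (card_str_to_int s1 / 4)) (by omega)
    obtain ⟨loN, hlo⟩ := Int.eq_ofNat_of_zero_le
      (a := min (card_str_to_int s0 / 4) (card_str_to_int s1 / 4)) (by omega)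
    rw [hhi, hlo]
    exact tbl_eq hiN (by omega) loN (by omega) _ (by omega)
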